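-- pv_equiv track=rewrite | github.com/jurdanetac/enigma | src/utils.py | check_key
-- ===== SOURCE A (Python) =====
-- def check_key(key: str, kind: str) -> bool:
--     """Check if key is in valid format.
--
--     :param key: character mappings
--     :type key: str
--     :param kind: type of key to be checked
--     :type kind: str
--     :returns: True if key is in valid format
--     :rtype: bool
--     :raises ValueError: if key is not in valid format
--     :example: stator.check_key("EJMZALYXVBWFCRQUONTSPIKHGD") -> True
--
--     """
--
--     # convert key to uppercase and remove whitespaces
--     key = key.upper().strip()
--
--     ## Check if key is in valid format
--     if kind == "reflector":
--         ## Conditions that must be true for reflectors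
--         # True if key is a string, False otherwise
--         instance: bool = isinstance(key, str)
--         # True if key has 26 characters, False otherwise
--         length: bool = len(key) == 26
--         # True if key only contains letters, False otherwise
--         alphabetical: bool = key.isalpha()
--         # True if all characters in key are unique, False otherwise
--         unique: bool = len(set(key)) == len(key)
--
--         # check if key is alphabetical and has 26 non-repeating characters
--         if not (instance and length and alphabetical and unique):
--             raise ValueError("Key must be a string of 26 letters.")
--
--         # list of tuples which represent the wirings of the reflector
--         pairs: list[tuple] = [(key[i], chr(i + 65)) for i in range(26)]
--
--         # the wirings are connected as a loop between two letters
--         if len(set(map(tuple, map(sorted, pairs)))) != 13: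
--             raise ValueError("Wrong characters mappings.")
--     # plugboard
--     elif kind == "plugboard":
--         ## Conditions that must be true for plugboards
--         # TODO
--         pass
--     # rotors
--     else:
--         ## Conditions that must be true for rotors
--         # TODO
--         pass
--
--     return True
-- ===== SOURCE B (Python) =====
-- def check_key(key: str, kind: str) -> bool:
--     """Check if key is in valid format (see A); raises ValueError if not."""
--     key = key.upper().strip()
--     if kind == "reflector":
--         if not (isinstance(key, str) and len(key) == 26 and key.isalpha()
--                 and len(set(key)) == len(key)):
--             raise ValueError("Key must be a string of 26 letters.")
--         # the wiring must be a fixed-point-free involution on A..Z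
--         for i in range(26):
--             c = key[i]
--             if not ('A' <= c <= 'Z'
--                     and key[ord(c) - 65] == chr(i + 65)
--                     and c != chr(i + 65)):
--                 raise ValueError("Wrong characters mappings.")
--     return True
-- ===== Notes on version B (the rewrite author's own statement) =====
-- stated objective: simpler
-- what changed: The reflector wiring check no longer builds the 26 sorted wiring pairs and counts the distinct ones via a set; it verifies directly, index by index, that the key is a fixed-point-free involution (key[ord(key[i])-65] == chr(i+65) and key[i] != chr(i+65)), raising the same ValueError when the check fails.
import Mathlib
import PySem

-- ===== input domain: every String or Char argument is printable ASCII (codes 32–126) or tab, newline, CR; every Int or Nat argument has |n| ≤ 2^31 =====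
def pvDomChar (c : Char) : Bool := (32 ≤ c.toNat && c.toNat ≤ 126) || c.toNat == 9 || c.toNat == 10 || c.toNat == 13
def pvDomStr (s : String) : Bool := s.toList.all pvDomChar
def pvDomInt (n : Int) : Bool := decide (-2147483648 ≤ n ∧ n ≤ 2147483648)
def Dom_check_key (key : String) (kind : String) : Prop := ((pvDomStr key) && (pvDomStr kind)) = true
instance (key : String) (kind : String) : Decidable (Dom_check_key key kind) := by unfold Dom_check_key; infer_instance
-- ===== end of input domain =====

-- B replaces A's pair-building-and-counting reflector wiring check by a direct
-- fixed-point-free-involution check; equivalence is about the RETURN value (both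
-- Pythons raise ValueError outside Pre_check_key, where the ports return false).

-- shared normalization line: key = key.upper().strip()
def normKey (key : String) : List Char :=
  PySem.Chars.strip (PySem.Chars.upper key.toList)

-- ===== PORT A =====
-- tuple(sorted(p)) for a 2-tuple of characters
def sorted2 (p : Char × Char) : Char × Char :=
  if p.1 ≤ p.2 then p else (p.2, p.1)

-- where Python A raises ValueError this port returns false (excluded by Pre_check_key)
def check_key (key : String) (kind : String) : Bool :=
  let k := normKey key
  if kind == "reflector" then
    let inst : Bool := true                                   -- isinstance(key, str)
    let length : Bool := decide (k.length = 26)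
    let alphabetical : Bool := PySem.Chars.strIsalpha k
    let unique : Bool := decide ((PySem.Set.ofList k).length = k.length)
    if !(inst && length && alphabetical && unique) then
      false          -- raise ValueError("Key must be a string of 26 letters.")
    else
      let pairs : List (Char × Char) :=
        (PySem.List.pyRange 0 26 1).map
          (fun i => (PySem.List.pyGetD k i ' ', Char.ofNat (i.toNat + 65)))
      if decide ((PySem.Set.ofList (pairs.map sorted2)).length ≠ 13) then
        false        -- raise ValueError("Wrong characters mappings.")
      else true
  else if kind == "plugboard" then
    true
  else
    true

-- ===== PORT B =====
-- where Python B raises ValueError this port returns false (excluded by Pre_check_key)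
def check_key_alt (key : String) (kind : String) : Bool :=
  let k := normKey key
  if kind == "reflector" then
    if !(true && decide (k.length = 26) && PySem.Chars.strIsalpha k
          && decide ((PySem.Set.ofList k).length = k.length)) then
      false          -- raise ValueError("Key must be a string of 26 letters.")
    else
      -- for i in range(26): the wiring must be a fixed-point-free involution
      (PySem.List.pyRange 0 26 1).all fun i =>
        let c := PySem.List.pyGetD k i ' '
        decide ('A' ≤ c) && decide (c ≤ 'Z')
          && (PySem.List.pyGetD k ((c.toNat : Int) - 65) ' ' == Char.ofNat (i.toNat + 65))
          && !(c == Char.ofNat (i.toNat + 65))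
  else
    true

-- ===== PRECONDITION & SPEC =====
-- Pre_check_key excludes exactly the inputs on which A raises ValueError (and so
-- returns no value): for kind = "reflector" the normalized key must be 26 distinct
-- letters A..Z whose wiring is a fixed-point-free involution; other kinds always return.
def Pre_check_key (key : String) (kind : String) : Prop :=
  kind = "reflector" →
    (normKey key).length = 26 ∧ (normKey key).Nodup ∧
    (∀ c ∈ normKey key, 'A' ≤ c ∧ c ≤ 'Z') ∧
    ∀ i, i < 26 →
      (normKey key).getD (((normKey key).getD i 'A').toNat - 65) 'A' = Char.ofNat (i + 65) ∧
      (normKey key).getD i 'A' ≠ Char.ofNat (i + 65)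
instance (key : String) (kind : String) : Decidable (Pre_check_key key kind) := by
  unfold Pre_check_key; infer_instance

def pvWitness_check_key : String × String := ("EJMZALYXVBWFCRQUONTSPIKHGD", "rotor")

def Spec_check_key (key : String) (kind : String) (out : Bool) : Prop := out = check_key_alt key kind
instance (key : String) (kind : String) (out : Bool) : Decidable (Spec_check_key key kind out) := by
  unfold Spec_check_key; infer_instance

-- ===== CLAIM (what is proved, stated in full; the proofs are below) =====
def Claim_equal_check_key : Prop := ∀ (key : String) (kind : String), Dom_check_key key kind → Pre_check_key key kind → Spec_check_key key kind (check_key key kind)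

-- ===== LEMMAS AND PROOFS =====

-- 'A' ≤ c ≤ 'Z' read on code points
theorem char_toNat_of_AZ {c : Char} (h1 : 'A' ≤ c) (h2 : c ≤ 'Z') :
    65 ≤ c.toNat ∧ c.toNat ≤ 90 := by
  constructor <;> simpa [Char.le_def, UInt32.le_iff_toNat_le] using ‹_›

theorem chr_toNat : ∀ a : Nat, a < 26 → (Char.ofNat (a + 65)).toNat = a + 65 := by decide

theorem sorted2_swap (a b : Char) : sorted2 (a, b) = sorted2 (b, a) := by
  simp only [sorted2]
  rcases le_total a b with h | h
  · rcases eq_or_ne a b with rfl | hne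
    · simp
    · rw [if_pos h, if_neg (fun hba => hne (le_antisymm h hba))]
  · rcases eq_or_ne a b with rfl | hne
    · simp
    · rw [if_neg (fun hab => hne (le_antisymm hab h)), if_pos h]

theorem sorted2_eq_cases {a b a' b' : Char} (h : sorted2 (a, b) = sorted2 (a', b')) :
    (a = a' ∧ b = b') ∨ (a = b' ∧ b = a') := by
  simp only [sorted2] at h
  split_ifs at h <;> simp only [Prod.mk.injEq] at h <;> tauto

-- the heart of the equivalence: for a fixed-point-free involution on A..Z the 26
-- sorted wiring pairs collapse to exactly 13 distinct ones
set_option maxHeartbeats 1000000 in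
theorem card13 (k : List Char) (hlen : k.length = 26) (hnodup : k.Nodup)
    (hAZ : ∀ c ∈ k, 'A' ≤ c ∧ c ≤ 'Z')
    (hinv : ∀ i, i < 26 →
      k.getD ((k.getD i 'A').toNat - 65) 'A' = Char.ofNat (i + 65) ∧
      k.getD i 'A' ≠ Char.ofNat (i + 65)) :
    (PySem.Set.ofList ((List.range 26).map
      (fun j => sorted2 (k.getD j ' ', Char.ofNat (j + 65))))).length = 13 := by
  set g : Nat → Char × Char := fun j => sorted2 (k.getD j ' ', Char.ofNat (j + 65)) with hg
  set L : List (Char × Char) := (List.range 26).map g with hL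
  -- the default of getD is irrelevant below index 26
  have hdd : ∀ j, j < 26 → ∀ d : Char, k.getD j d = k.getD j ' ' := by
    intro j hj d
    rw [List.getD_eq_getElem k d (by omega), List.getD_eq_getElem k ' ' (by omega)]
  have hmem : ∀ j, j < 26 → k.getD j ' ' ∈ k := by
    intro j hj
    rw [List.getD_eq_getElem k ' ' (by omega)]
    exact List.getElem_mem _
  have hAZ' : ∀ j, j < 26 → 65 ≤ (k.getD j ' ').toNat ∧ (k.getD j ' ').toNat ≤ 90 := by
    intro j hj
    obtain ⟨h1, h2⟩ := hAZ _ (hmem j hj)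
    exact char_toNat_of_AZ h1 h2
  have hinj : ∀ i j, i < 26 → j < 26 → k.getD i ' ' = k.getD j ' ' → i = j := by
    intro i j hi hj h
    rw [List.getD_eq_getElem k ' ' (by omega), List.getD_eq_getElem k ' ' (by omega)] at h
    exact (List.Nodup.getElem_inj_iff hnodup).mp h
  have hchr_inj : ∀ i j, i < 26 → j < 26 → Char.ofNat (i + 65) = Char.ofNat (j + 65) → i = j := by
    intro i j hi hj h
    have := congrArg Char.toNat h
    rw [chr_toNat i hi, chr_toNat j hj] at this
    omega
  -- each distinct sorted pair has exactly the two preimages i and σ(i) among 0..25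
  have himg : L.toFinset = (Finset.range 26).image g := by
    ext x
    simp [hL, List.mem_map, Finset.mem_image, eq_comm]
  have hfiber : ∀ x ∈ (Finset.range 26).image g,
      ((Finset.range 26).filter (fun j => g j = x)).card = 2 := by
    intro x hx
    obtain ⟨i, hi', rfl⟩ := Finset.mem_image.mp hx
    have hi : i < 26 := Finset.mem_range.mp hi'
    set σ : Nat := (k.getD i ' ').toNat - 65 with hσdef
    have hσlt : σ < 26 := by have := (hAZ' i hi).2; omega
    have hcσ : k.getD σ ' ' = Char.ofNat (i + 65) := by
      have h1 := (hinv i hi).1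
      rw [hdd i hi 'A'] at h1
      rw [← hσdef] at h1
      rw [hdd σ hσlt 'A'] at h1
      exact h1
    have hne_i : k.getD i ' ' ≠ Char.ofNat (i + 65) := by
      have h2 := (hinv i hi).2
      rwa [hdd i hi 'A'] at h2
    have hσne : i ≠ σ := by
      intro h
      have hcσ' := hcσ
      rw [← h] at hcσ'
      exact hne_i hcσ'
    have hchr_i : Char.ofNat (σ + 65) = k.getD i ' ' := by
      have h65 := (hAZ' i hi).1
      have hσ65 : σ + 65 = (k.getD i ' ').toNat := by omega
      rw [hσ65, Char.ofNat_toNat]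
    have hiff : ∀ j, j < 26 → (g j = g i ↔ (j = i ∨ j = σ)) := by
      intro j hj
      constructor
      · intro h
        rcases sorted2_eq_cases h with ⟨h1, h2⟩ | ⟨h1, h2⟩
        · exact Or.inl (hchr_inj j i hj hi h2)
        · refine Or.inr (hinj j σ hj hσlt ?_)
          rw [h1, hcσ]
      · rintro (rfl | rfl)
        · rfl
        · show sorted2 (k.getD σ ' ', Char.ofNat (σ + 65)) = sorted2 (k.getD i ' ', Char.ofNat (i + 65))
          rw [hcσ, hchr_i, sorted2_swap]
    have hfe : (Finset.range 26).filter (fun j => g j = g i) = {i, σ} := by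
      ext j
      simp only [Finset.mem_filter, Finset.mem_range, Finset.mem_insert, Finset.mem_singleton]
      constructor
      · rintro ⟨hj, hgj⟩
        exact (hiff j hj).mp hgj
      · rintro (rfl | rfl)
        · exact ⟨hi, rfl⟩
        · exact ⟨hσlt, (hiff σ hσlt).mpr (Or.inr rfl)⟩
    rw [hfe, Finset.card_insert_of_notMem (by simp [hσne]), Finset.card_singleton]
  -- 26 indices, fibers of size 2: 13 distinct pairs
  have hndL : (PySem.Set.ofList L).Nodup := PySem.Set.nodup_ofList L
  have htf : (PySem.Set.ofList L).toFinset = L.toFinset := by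
    ext x
    simp [PySem.Set.mem_ofList]
  have hcard : (PySem.Set.ofList L).length = L.toFinset.card := by
    rw [← List.toFinset_card_of_nodup hndL, htf]
  have h1 : ∑ x ∈ (Finset.range 26).image g,
      ((Finset.range 26).filter (fun j => g j = x)).card
      = 2 * ((Finset.range 26).image g).card := by
    rw [Finset.sum_congr rfl hfiber, Finset.sum_const, smul_eq_mul, mul_comm]
  have h2 := Finset.card_eq_sum_card_image g (Finset.range 26)
  rw [Finset.card_range] at h2
  rw [hcard, himg]
  omega

-- ===== VERDICT (by name: the statement is the Claim_ definition above) =====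
set_option maxHeartbeats 1000000 in
theorem check_key_spec : Claim_equal_check_key := by
  intro key kind _hdom hpre
  unfold Spec_check_key
  by_cases hk : kind = "reflector"
  · subst hk
    obtain ⟨hlen, hnodup, hAZ, hinv⟩ := hpre rfl
    have halpha : PySem.Chars.strIsalpha (normKey key) = true := by
      simp only [PySem.Chars.strIsalpha, Bool.and_eq_true, Bool.not_eq_eq_eq_not, Bool.not_true,
        List.isEmpty_eq_false_iff, List.all_eq_true]
      refine ⟨by intro h; rw [h] at hlen; simp at hlen, ?_⟩
      intro c hc
      obtain ⟨h1, h2⟩ := hAZ c hc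
      simp [PySem.Chars.isalpha, PySem.Chars.isupper, h1, h2]
    have huniq : (PySem.Set.ofList (normKey key)).length = (normKey key).length := by
      rw [PySem.Set.ofList_eq_self_of_nodup _ hnodup]
    simp only [check_key, check_key_alt, beq_self_eq_true, if_pos, hlen, halpha, huniq,
      decide_true, Bool.and_self, Bool.not_true, Bool.false_eq_true, if_false]
    -- A side: the 13 distinct sorted pairs
    have hA : (PySem.Set.ofList (((PySem.List.pyRange 0 26 1).map
        (fun i => ((PySem.List.pyGetD (normKey key) i ' ', Char.ofNat (i.toNat + 65)) : Char × Char))).map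
          sorted2)).length = 13 := by
      have hrw : ((PySem.List.pyRange 0 26 1).map
          (fun i => ((PySem.List.pyGetD (normKey key) i ' ', Char.ofNat (i.toNat + 65)) : Char × Char))).map
            sorted2
          = (List.range 26).map (fun j => sorted2 ((normKey key).getD j ' ', Char.ofNat (j + 65))) := by
        rw [PySem.List.pyRange_one]
        simp [List.map_map, Function.comp_def]
      rw [hrw]
      exact card13 (normKey key) hlen hnodup hAZ hinv
    rw [hA]
    -- B side: the involution check passes at every index
    have hB : ((PySem.List.pyRange 0 26 1).all fun i =>
        (decide ('A' ≤ PySem.List.pyGetD (normKey key) i ' ')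
          && decide (PySem.List.pyGetD (normKey key) i ' ' ≤ 'Z')
          && (PySem.List.pyGetD (normKey key)
                (((PySem.List.pyGetD (normKey key) i ' ').toNat : Int) - 65) ' '
              == Char.ofNat (i.toNat + 65))
          && !(PySem.List.pyGetD (normKey key) i ' ' == Char.ofNat (i.toNat + 65)))) = true := by
      rw [List.all_eq_true]
      intro i hi
      obtain ⟨h0, h26⟩ := (PySem.List.mem_pyRange_one).mp hi
      obtain ⟨j, rfl⟩ : ∃ j : Nat, i = (j : Int) := ⟨i.toNat, (Int.toNat_of_nonneg h0).symm⟩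
      have hj : j < 26 := by exact_mod_cast h26
      simp only [PySem.List.pyGetD_natCast, Int.toNat_natCast]
      set c : Char := (normKey key).getD j ' ' with hc
      have hgd : ∀ d : Char, (normKey key).getD j d = c := by
        intro d
        rw [hc, List.getD_eq_getElem _ ' ' (by omega), List.getD_eq_getElem _ d (by omega)]
      obtain ⟨hA1, hA2⟩ := hAZ c (by
        rw [hc, List.getD_eq_getElem _ ' ' (by omega)]; exact List.getElem_mem _)
      obtain ⟨h65, h90⟩ := char_toNat_of_AZ hA1 hA2
      have hcast : (c.toNat : Int) - 65 = ((c.toNat - 65 : Nat) : Int) := by omega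
      rw [hcast, PySem.List.pyGetD_natCast]
      obtain ⟨hi1, hi2⟩ := hinv j hj
      rw [hgd 'A'] at hi1 hi2
      have hσlt : c.toNat - 65 < 26 := by omega
      have hi1' : (normKey key).getD (c.toNat - 65) ' ' = Char.ofNat (j + 65) := by
        rw [List.getD_eq_getElem _ ' ' (by omega), ← List.getD_eq_getElem _ 'A' (by omega)]
        exact hi1
      simp only [Bool.and_eq_true, decide_eq_true_eq, beq_iff_eq, Bool.not_eq_true',
        beq_eq_false_iff_ne]
      exact ⟨⟨⟨hA1, hA2⟩, hi1'⟩, hi2⟩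
    simp [hB]

  · have hk' : (kind == "reflector") = false := beq_eq_false_iff_ne.mpr hk
    simp [check_key, check_key_alt, hk']
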